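-- pv_equiv track=rewrite | github.com/dreamev/mm-ecu | code-old.py | decode_button_press
-- ===== SOURCE A (Python) =====
-- def decode_button_press(state):
--     int_values = [x for x in state]
--     b0 = int_values[0]
--     b1 = int_values[1]
--     bay1 = [int(d) for d in bin((1<<8)+b0)[-8:]]
--     bay2 = [int(d) for d in bin((1<<8)+b1)[-4:]]
--     button_array = bay2+bay1
--     return button_array
-- ===== SOURCE B (Python) =====
-- def bits(n, width):
--     """The `width` lowest binary digits of the magnitude of n, most significant first."""
--     n = abs(n)
--     out = []
--     for _ in range(width):
--         out.append(n & 1)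
--         n >>= 1
--     return out[::-1]
--
--
-- def decode_button_press(state):
--     return bits(256 + state[1], 4) + bits(256 + state[0], 8)
-- ===== Notes on version B (the rewrite author's own statement) =====
-- stated objective: faster
-- what changed: B replaces A's whole-list copy plus bin()-string building, slicing and per-character int() parsing by arithmetic bit extraction: a small bits(n, width) helper pulls the low binary digits of the magnitude with a mask-and-shift loop, and B reads only the two elements it uses.
import Mathlib
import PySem

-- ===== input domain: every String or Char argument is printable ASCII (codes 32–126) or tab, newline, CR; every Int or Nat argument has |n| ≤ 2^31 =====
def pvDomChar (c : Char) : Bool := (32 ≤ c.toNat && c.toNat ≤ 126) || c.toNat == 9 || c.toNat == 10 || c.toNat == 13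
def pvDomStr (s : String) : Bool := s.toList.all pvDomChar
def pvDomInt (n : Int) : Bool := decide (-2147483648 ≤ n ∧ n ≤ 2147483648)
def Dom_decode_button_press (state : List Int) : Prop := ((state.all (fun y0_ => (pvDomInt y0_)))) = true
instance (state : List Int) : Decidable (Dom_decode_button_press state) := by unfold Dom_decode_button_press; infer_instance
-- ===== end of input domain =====

-- B replaces A's whole-list copy plus bin()-string building and per-character int() parsing by
-- arithmetic bit extraction (a mask-and-shift loop over the magnitude) from the two used elements
-- only (measured faster in a timing run).

-- ===== PORT A =====

-- chars of Python's bin(n) after the '0b' prefix; structural fuel recursion (fuel = n suffices, n halves)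
def pvNatbitsAux : Nat → Nat → List Char
  | 0, _ => []
  | fuel+1, n => if n = 0 then [] else pvNatbitsAux fuel (n / 2) ++ [if n % 2 = 1 then '1' else '0']

def pvBits (n : Nat) : List Char := pvNatbitsAux n n

-- hand port of bin(n) as its list of characters; exact for every Int ('-0b…' for negatives, '0b0' for 0)
def pvBin (n : Int) : List Char :=
  if n < 0 then '-' :: '0' :: 'b' :: pvBits (-n).toNat
  else if n = 0 then ['0', 'b', '0']
  else '0' :: 'b' :: pvBits n.toNat

-- int(d) for a single character d; on non-digit characters Python raises ValueError (outside Pre_)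
def pvCharInt (c : Char) : Int := (PySem.Int.ofStr? (String.ofList [c])).getD 0

def decode_button_press (state : List Int) : List Int :=
  -- int_values = [x for x in state]; b0 = int_values[0]; b1 = int_values[1]
  match PySem.List.pyGet? (state.map (fun x => x)) 0, PySem.List.pyGet? (state.map (fun x => x)) 1 with
  | some b0, some b1 =>
    -- button_array = bay2 + bay1,  bay2 = [int(d) for d in bin((1<<8)+b1)[-4:]],  bay1 likewise [-8:]
    (PySem.List.slice (pvBin (256 + b1)) (some (-4)) none).map pvCharInt
      ++ (PySem.List.slice (pvBin (256 + b0)) (some (-8)) none).map pvCharInt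
  | _, _ => []   -- IndexError (len < 2): excluded by Pre_

-- ===== PORT B =====

-- bits(n, width): the `width` lowest binary digits of the magnitude of n, msb first
def pvToBits (n : Int) (width : Int) : List Int :=
  let m : Int := (n.natAbs : Int)   -- abs(n)
  -- for _ in range(width): out.append(n & 1); n >>= 1   (n & 1 = n % 2, n >> 1 = n // 2: exact)
  let p := (PySem.List.pyRange 0 width 1).foldl
    (fun (st : Int × List Int) _ => (PySem.Int.floordiv st.1 2, st.2 ++ [PySem.Int.mod st.1 2])) (m, [])
  p.2.reverse   -- out[::-1]

def decode_button_press_alt (state : List Int) : List Int :=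
  match PySem.List.pyGet? state 1 with
  | none => []     -- IndexError (len < 2): excluded by Pre_
  | some b1 =>
  match PySem.List.pyGet? state 0 with
  | none => []     -- IndexError (len < 1): excluded by Pre_
  | some b0 => pvToBits (256 + b1) 4 ++ pvToBits (256 + b0) 8

-- ===== PRECONDITION & SPEC =====

-- Pre_ excludes exactly the inputs on which A raises: fewer than two elements (IndexError), or a
-- first/second element for which bin(256+x) has fewer than 8 (resp. 4) binary digits, so that the
-- [-8:]/[-4:] slice still contains 'b' or '-' and int(d) raises ValueError.
def Pre_decode_button_press (state : List Int) : Prop :=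
  2 ≤ state.length ∧ 128 ≤ (256 + state.getD 0 0).natAbs ∧ 8 ≤ (256 + state.getD 1 0).natAbs
instance (state : List Int) : Decidable (Pre_decode_button_press state) := by
  unfold Pre_decode_button_press; infer_instance

def pvWitness_decode_button_press : List Int := [5, 3]

def Spec_decode_button_press (state : List Int) (out : List Int) : Prop :=
  out = decode_button_press_alt state
instance (state : List Int) (out : List Int) : Decidable (Spec_decode_button_press state out) := by
  unfold Spec_decode_button_press; infer_instance

-- ===== CLAIM =====

def Claim_equal_decode_button_press : Prop :=
  ∀ (state : List Int), Dom_decode_button_press state → Pre_decode_button_press state →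
    Spec_decode_button_press state (decode_button_press state)

-- ===== LEMMAS AND PROOFS =====

-- proof-side helpers: the last k binary digits (msb-first) of a Nat, and the first k lsb-first bits of an Int

def pvLowbits : Nat → Nat → List Char
  | 0, _ => []
  | k+1, n => pvLowbits k (n / 2) ++ [if n % 2 = 1 then '1' else '0']

def pvLsb : Nat → Int → List Int
  | 0, _ => []
  | k+1, v => v % 2 :: pvLsb k (v / 2)

theorem pvNatbitsAux_congr : ∀ (n f1 f2 : Nat), n ≤ f1 → n ≤ f2 →
    pvNatbitsAux f1 n = pvNatbitsAux f2 n := by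
  intro n
  induction n using Nat.strong_induction_on with
  | _ n ih =>
    intro f1 f2 h1 h2
    match n, f1, f2 with
    | 0, 0, 0 => rfl
    | 0, 0, f2+1 => simp [pvNatbitsAux]
    | 0, f1+1, 0 => simp [pvNatbitsAux]
    | 0, f1+1, f2+1 => simp [pvNatbitsAux]
    | n+1, f1+1, f2+1 =>
      simp only [pvNatbitsAux, if_neg (Nat.succ_ne_zero n)]
      rw [ih ((n+1)/2) (by omega) f1 f2 (by omega) (by omega)]

theorem pvBits_pos (n : Nat) (h : 1 ≤ n) :
    pvBits n = pvBits (n / 2) ++ [if n % 2 = 1 then '1' else '0'] := by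
  match n, h with
  | n+1, _ =>
    show pvNatbitsAux (n+1) (n+1) = _
    simp only [pvNatbitsAux, if_neg (Nat.succ_ne_zero n)]
    rw [pvNatbitsAux_congr ((n+1)/2) n ((n+1)/2) (by omega) (by omega)]
    rfl

theorem pvLowbits_length (k n : Nat) : (pvLowbits k n).length = k := by
  induction k generalizing n with
  | zero => rfl
  | succ k ih => simp [pvLowbits, ih]

theorem pvLowbits_succ_msb (k : Nat) : ∀ n : Nat,
    pvLowbits (k+1) n = (if n / 2^k % 2 = 1 then '1' else '0') :: pvLowbits k n := by
  induction k with
  | zero => intro n; simp [pvLowbits]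
  | succ k ih =>
    intro n
    have e : n / 2 / 2^k = n / 2^(k+1) := by
      rw [Nat.div_div_eq_div_mul, pow_succ, mul_comm]
    calc pvLowbits (k+2) n = pvLowbits (k+1) (n/2) ++ [if n % 2 = 1 then '1' else '0'] := rfl
      _ = ((if n/2/2^k % 2 = 1 then '1' else '0') :: pvLowbits k (n/2)) ++ [if n % 2 = 1 then '1' else '0'] := by rw [ih]
      _ = (if n / 2^(k+1) % 2 = 1 then '1' else '0') :: pvLowbits (k+1) n := by rw [e]; rfl

theorem pvBits_split (k : Nat) : ∀ n : Nat, 2^k ≤ 2*n →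
    pvBits n = pvBits (n / 2^k) ++ pvLowbits k n := by
  induction k with
  | zero => intro n _; simp [pvLowbits]
  | succ k ih =>
    intro n h
    have hk : 2^k ≤ n := by rw [pow_succ] at h; omega
    have h2 : 2^k ≤ 2*n := by omega
    have hq : 1 ≤ n / 2^k := (Nat.one_le_div_iff (Nat.pow_pos (by omega : 0 < 2))).mpr hk
    have e : n / 2^k / 2 = n / 2^(k+1) := by
      rw [Nat.div_div_eq_div_mul, pow_succ]
    rw [ih n h2, pvBits_pos (n / 2^k) hq, e, List.append_assoc,
        pvLowbits_succ_msb k n]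
    rfl

-- bit-value bridge: int(d) of the produced digit characters
theorem pvCharInt_bit (m : Nat) : pvCharInt (if m % 2 = 1 then '1' else '0') = ((m % 2 : Nat) : Int) := by
  rcases Nat.mod_two_eq_zero_or_one m with h | h <;> rw [h] <;> rfl

theorem pvMap_lowbits (k : Nat) : ∀ n : Nat,
    (pvLowbits k n).map pvCharInt = (pvLsb k (n : Int)).reverse := by
  induction k with
  | zero => intro n; rfl
  | succ k ih =>
    intro n
    have c1 : ((n : Int)) / 2 = ((n / 2 : Nat) : Int) := by omega
    have c2 : ((n : Int)) % 2 = ((n % 2 : Nat) : Int) := by omega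
    simp only [pvLowbits, pvLsb, List.map_append, List.map_cons, List.map_nil, List.reverse_cons]
    rw [ih (n/2), pvCharInt_bit, c1, c2]

-- B's helper computes the 4 resp. 8 lsb-first bits of the magnitude, reversed
theorem pvToBits_char4 (n : Int) :
    pvToBits n 4 = (pvLsb 4 ((n.natAbs : Int))).reverse := by
  have fd : ∀ x : Int, PySem.Int.floordiv x 2 = x / 2 :=
    fun x => PySem.Int.floordiv_eq_ediv_of_pos (by norm_num)
  have md : ∀ x : Int, PySem.Int.mod x 2 = x % 2 :=
    fun x => PySem.Int.mod_eq_emod_of_pos (by norm_num)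
  unfold pvToBits
  simp only [fd, md]
  norm_num [PySem.List.pyRange_one_cons, pvLsb]

theorem pvToBits_char8 (n : Int) :
    pvToBits n 8 = (pvLsb 8 ((n.natAbs : Int))).reverse := by
  have fd : ∀ x : Int, PySem.Int.floordiv x 2 = x / 2 :=
    fun x => PySem.Int.floordiv_eq_ediv_of_pos (by norm_num)
  have md : ∀ x : Int, PySem.Int.mod x 2 = x % 2 :=
    fun x => PySem.Int.mod_eq_emod_of_pos (by norm_num)
  unfold pvToBits
  simp only [fd, md]
  norm_num [PySem.List.pyRange_one_cons, pvLsb]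

-- A's slice of bin(m) is the last k binary digits of |m|, when |m| has at least k digits
theorem pvBin_drop (m : Int) (k : Nat) (hm : m ≠ 0) (h : 2^k ≤ 2 * m.natAbs) :
    (pvBin m).drop ((pvBin m).length - k) = pvLowbits k m.natAbs := by
  rcases lt_trichotomy m 0 with hneg | hz | hpos
  · have e1 : pvBin m = '-' :: '0' :: 'b' :: pvBits m.natAbs := by
      unfold pvBin
      rw [if_pos hneg, show (-m).toNat = m.natAbs from by omega]
    rw [e1, pvBits_split k m.natAbs h]
    show (('-' :: '0' :: 'b' :: pvBits (m.natAbs / 2^k)) ++ pvLowbits k m.natAbs).drop _ = _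
    rw [show ('-' :: '0' :: 'b' :: (pvBits (m.natAbs / 2^k) ++ pvLowbits k m.natAbs)).length - k
          = ('-' :: '0' :: 'b' :: pvBits (m.natAbs / 2^k)).length from by simp [pvLowbits_length]; omega]
    exact List.drop_left
  · exact absurd hz hm
  · have e1 : pvBin m = '0' :: 'b' :: pvBits m.natAbs := by
      unfold pvBin
      rw [if_neg (by omega), if_neg hm, show m.toNat = m.natAbs from by omega]
    rw [e1, pvBits_split k m.natAbs h]
    show (('0' :: 'b' :: pvBits (m.natAbs / 2^k)) ++ pvLowbits k m.natAbs).drop _ = _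
    rw [show ('0' :: 'b' :: (pvBits (m.natAbs / 2^k) ++ pvLowbits k m.natAbs)).length - k
          = ('0' :: 'b' :: pvBits (m.natAbs / 2^k)).length from by simp [pvLowbits_length]; omega]
    exact List.drop_left

theorem pvA_char (b0 b1 : Int) (rest : List Int)
    (h0 : 128 ≤ (256 + b0).natAbs) (h1 : 8 ≤ (256 + b1).natAbs) :
    decode_button_press (b0 :: b1 :: rest)
      = (pvLsb 4 (((256 + b1).natAbs : Int))).reverse ++ (pvLsb 8 (((256 + b0).natAbs : Int))).reverse := by
  have g0 : PySem.List.pyGet? ((b0 :: b1 :: rest).map (fun x => x)) 0 = some b0 := by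
    simp [PySem.List.pyGet?, PySem.List.pyIdx?]
    all_goals rw [if_pos (by omega : (0:Int) ≤ ↑rest.length + 1)]; rfl
  have g1 : PySem.List.pyGet? ((b0 :: b1 :: rest).map (fun x => x)) 1 = some b1 := by
    simp [PySem.List.pyGet?, PySem.List.pyIdx?]
    all_goals rw [if_pos (by omega : (0:Int) ≤ ↑rest.length + 1)]; rfl
  have s8 : PySem.List.slice (pvBin (256 + b0)) (some (-8)) none
      = (pvBin (256 + b0)).drop ((pvBin (256 + b0)).length - 8) :=
    PySem.List.slice_from_neg_ofNat _ 8 (by norm_num)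
  have s4 : PySem.List.slice (pvBin (256 + b1)) (some (-4)) none
      = (pvBin (256 + b1)).drop ((pvBin (256 + b1)).length - 4) :=
    PySem.List.slice_from_neg_ofNat _ 4 (by norm_num)
  unfold decode_button_press
  rw [g0, g1]
  show (PySem.List.slice (pvBin (256 + b1)) (some (-4)) none).map pvCharInt
      ++ (PySem.List.slice (pvBin (256 + b0)) (some (-8)) none).map pvCharInt = _
  rw [s4, s8]
  rw [pvBin_drop (256 + b0) 8 (by omega) (by rw [show (2:Nat)^8 = 256 from by norm_num]; omega),
      pvBin_drop (256 + b1) 4 (by omega) (by rw [show (2:Nat)^4 = 16 from by norm_num]; omega),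
      pvMap_lowbits, pvMap_lowbits]

theorem pvAlt_char (b0 b1 : Int) (rest : List Int) :
    decode_button_press_alt (b0 :: b1 :: rest)
      = (pvLsb 4 (((256 + b1).natAbs : Int))).reverse ++ (pvLsb 8 (((256 + b0).natAbs : Int))).reverse := by
  have g0 : PySem.List.pyGet? (b0 :: b1 :: rest) 0 = some b0 := by
    simp [PySem.List.pyGet?, PySem.List.pyIdx?]
    all_goals rw [if_pos (by omega : (0:Int) ≤ ↑rest.length + 1)]; rfl
  have g1 : PySem.List.pyGet? (b0 :: b1 :: rest) 1 = some b1 := by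
    simp [PySem.List.pyGet?, PySem.List.pyIdx?]
    all_goals rw [if_pos (by omega : (0:Int) ≤ ↑rest.length + 1)]; rfl
  simp only [decode_button_press_alt, g0, g1]
  rw [pvToBits_char4, pvToBits_char8]

-- ===== VERDICT =====

theorem decode_button_press_spec : Claim_equal_decode_button_press := by
  intro state _ hpre
  match state, hpre with
  | b0 :: b1 :: rest, ⟨_, h0, h1⟩ =>
    show decode_button_press (b0 :: b1 :: rest) = decode_button_press_alt (b0 :: b1 :: rest)
    rw [pvA_char b0 b1 rest h0 h1, pvAlt_char b0 b1 rest]
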